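-- pv_equiv track=rewrite | github.com/Kawser-nerd/CLCDSA | Source Codes/AtCoder/arc098/A/4192044.py | solve
-- ===== SOURCE A (Python) =====
-- from collections import Counter
--
-- def solve(N, S):
--     c = Counter(S)
--     ans = 3 * 10 ** 5 + 1
--
--     right_e = c["E"]
--     left_w = 0
--     for i in range(N):
--         if S[i] == "E":
--             right_e -= 1
--
--         ans = min(ans, left_w + right_e)
--
--         if S[i] == "W":
--             left_w += 1
--     return ans
-- ===== SOURCE B (Python) =====
-- def solve(N, S):
--     # tabulated prefix/suffix counts instead of A's single incremental pass
--     W = [0]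
--     for ch in S:
--         W.append(W[-1] + (ch == "W"))
--     E = [0]
--     for ch in reversed(S):
--         E.append(E[-1] + (ch == "E"))
--     E.reverse()
--     ans = 3 * 10 ** 5 + 1
--     for i in range(N):
--         ans = min(ans, W[i] + E[i + 1])
--     return ans
-- ===== Notes on version B (the rewrite author's own statement) =====
-- stated objective: alternative
-- what changed: B replaces A's single incremental pass (running left_w/right_e counters updated around each candidate) with two separately tabulated prefix-W and suffix-E count arrays plus a final loop taking min over W[i]+E[i+1].
import Mathlib
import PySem

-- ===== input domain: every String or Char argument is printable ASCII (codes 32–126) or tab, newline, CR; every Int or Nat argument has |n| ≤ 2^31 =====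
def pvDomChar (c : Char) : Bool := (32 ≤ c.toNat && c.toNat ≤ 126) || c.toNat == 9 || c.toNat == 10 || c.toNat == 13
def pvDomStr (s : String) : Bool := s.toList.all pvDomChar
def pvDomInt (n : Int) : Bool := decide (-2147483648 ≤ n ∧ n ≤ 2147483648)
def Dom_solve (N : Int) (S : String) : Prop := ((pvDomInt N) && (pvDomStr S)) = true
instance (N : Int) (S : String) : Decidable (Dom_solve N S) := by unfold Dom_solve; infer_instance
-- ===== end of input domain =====

-- B tabulates prefix-'W' and suffix-'E' count arrays in separate passes instead of A's
-- single incremental pass; same cost, different decomposition.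

-- ===== PORT A =====
def solve (N : Int) (S : String) : Int :=
  let cs := S.toList
  let c := PySem.Dict.counter cs
  let st := (PySem.List.pyRange 0 N 1).foldl
    (fun (st : Int × Int × Int) i =>
      let ans := st.1
      let right_e := st.2.1
      let left_w := st.2.2
      let ch := PySem.List.pyGetD cs i ' '   -- S[i]; Pre_solve keeps i in range
      let right_e := if ch = 'E' then right_e - 1 else right_e
      let ans := min ans (left_w + right_e)
      let left_w := if ch = 'W' then left_w + 1 else left_w
      (ans, right_e, left_w))
    (3 * 10 ^ 5 + 1, c.getD 'E' 0, 0)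
  st.1

-- ===== PORT B =====
def solve_alt (N : Int) (S : String) : Int :=
  let cs := S.toList
  let W := cs.foldl (fun (w : List Int) ch =>
      w ++ [PySem.List.pyGetD w (-1) 0 + (if ch = 'W' then 1 else 0)]) [0]
  let E0 := cs.reverse.foldl (fun (e : List Int) ch =>
      e ++ [PySem.List.pyGetD e (-1) 0 + (if ch = 'E' then 1 else 0)]) [0]
  let E := E0.reverse
  (PySem.List.pyRange 0 N 1).foldl
    (fun ans i => min ans (PySem.List.pyGetD W i 0 + PySem.List.pyGetD E (i + 1) 0))
    (3 * 10 ^ 5 + 1)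

-- ===== PRECONDITION & SPEC =====
-- Pre_ excludes exactly N > len(S), where the Python A raises IndexError on S[i].
def Pre_solve (N : Int) (S : String) : Prop := N ≤ PySem.Str.len S
instance (N : Int) (S : String) : Decidable (Pre_solve N S) := by unfold Pre_solve; infer_instance
def pvWitness_solve : Int × String := (3, "WEW")

def Spec_solve (N : Int) (S : String) (out : Int) : Prop := out = solve_alt N S
instance (N : Int) (S : String) (out : Int) : Decidable (Spec_solve N S out) := by unfold Spec_solve; infer_instance

-- ===== CLAIM (what is proved, stated in full; the proofs are below) =====
def Claim_equal_solve : Prop := ∀ (N : Int) (S : String), Dom_solve N S → Pre_solve N S → Spec_solve N S (solve N S)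

-- ===== LEMMAS AND PROOFS =====

-- the common candidate value at index i
def pvCand (cs : List Char) (i : Nat) : Int :=
  ((cs.take i).count 'W' : Int) + ((cs.drop (i + 1)).count 'E' : Int)

-- B's array builder produces the table of prefix counts
theorem pv_build_spec (c : Char) (cs : List Char) :
    cs.foldl (fun (w : List Int) ch =>
        w ++ [PySem.List.pyGetD w (-1) 0 + (if ch = c then 1 else 0)]) [0]
      = (List.range (cs.length + 1)).map (fun k => ((cs.take k).count c : Int)) := by
  induction cs using List.reverseRecOn with
  | nil => simp
  | append_singleton xs a ih =>
    rw [List.foldl_append, ih]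
    have hsplit : (List.range (xs.length + 1)).map (fun k => ((xs.take k).count c : Int))
        = (List.range xs.length).map (fun k => ((xs.take k).count c : Int)) ++ [(xs.count c : Int)] := by
      rw [List.range_succ, List.map_append]; simp
    rw [hsplit, List.foldl_cons, List.foldl_nil,
        PySem.List.pyGetD_neg_one_append_singleton]
    have hmap : (List.range (xs.length + 1)).map (fun k => (((xs ++ [a]).take k).count c : Int))
        = (List.range (xs.length + 1)).map (fun k => ((xs.take k).count c : Int)) := by
      apply List.map_congr_left
      intro k hk
      rw [List.take_append_of_le_length (by simpa using Nat.lt_succ_iff.mp (List.mem_range.mp hk))]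
    have hx : (((xs ++ [a]).take (xs.length + 1)).count c : Int)
        = (xs.count c : Int) + (if a = c then 1 else 0) := by
      rw [List.take_of_length_le (by simp)]
      by_cases hac : a = c
      · simp [List.count_append, hac]
      · simp [List.count_append, hac]
    rw [show (xs ++ [a]).length = xs.length + 1 by simp, List.range_succ, List.map_append,
        hmap, hsplit]
    simp only [List.map_cons, List.map_nil, hx, List.append_assoc]

-- A's fold invariant
theorem pv_foldA_spec (cs : List Char) (n : Nat) (hn : n ≤ cs.length) :
    (PySem.List.pyRange 0 (n : Int) 1).foldl
      (fun (st : Int × Int × Int) i =>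
        let ans := st.1
        let right_e := st.2.1
        let left_w := st.2.2
        let ch := PySem.List.pyGetD cs i ' '
        let right_e := if ch = 'E' then right_e - 1 else right_e
        let ans := min ans (left_w + right_e)
        let left_w := if ch = 'W' then left_w + 1 else left_w
        (ans, right_e, left_w))
      (3 * 10 ^ 5 + 1, (cs.count 'E' : Int), 0)
    = (((List.range n).map (pvCand cs)).foldl min (3 * 10 ^ 5 + 1),
       ((cs.drop n).count 'E' : Int),
       ((cs.take n).count 'W' : Int)) := by
  induction n with
  | zero => simp [PySem.List.pyRange_one_eq_nil]
  | succ n ih =>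
    have hlt : n < cs.length := hn
    have hcast : ((n + 1 : Nat) : Int) = (n : Int) + 1 := by push_cast; ring
    rw [hcast, PySem.List.pyRange_one_succ_right (by positivity), List.foldl_append,
        ih (Nat.le_of_succ_le hn), List.foldl_cons, List.foldl_nil]
    have hch : PySem.List.pyGetD cs ((n : Int)) ' ' = cs[n] := by
      rw [PySem.List.pyGetD_natCast]; exact List.getD_eq_getElem _ _ hlt
    have hdrop : (cs.drop n).count 'E' = (cs.drop (n + 1)).count 'E' + (if cs[n] = 'E' then 1 else 0) := by
      rw [List.drop_eq_getElem_cons hlt, List.count_cons]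
      by_cases hE : cs[n] = 'E' <;> simp [hE]
    have htake : (cs.take (n + 1)).count 'W' = (cs.take n).count 'W' + (if cs[n] = 'W' then 1 else 0) := by
      rw [List.take_succ_eq_append_getElem hlt, List.count_append]
      by_cases hW : cs[n] = 'W' <;> simp [hW]
    rw [List.range_succ, List.map_append, List.foldl_append, List.map_cons, List.map_nil,
        List.foldl_cons, List.foldl_nil]
    simp only [hch]
    unfold pvCand
    by_cases hE : cs[n] = 'E' <;> by_cases hW : cs[n] = 'W' <;>
      · simp only [hE, hW, hdrop, htake, if_true, if_false]
        refine Prod.ext ?_ (Prod.ext ?_ ?_) <;> push_cast <;> simp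

-- B's final fold equals the same min-fold over candidates
theorem pv_foldB_spec (cs : List Char) (n : Nat) (hn : n ≤ cs.length) :
    (PySem.List.pyRange 0 (n : Int) 1).foldl
      (fun ans i =>
        min ans (PySem.List.pyGetD ((List.range (cs.length + 1)).map (fun k => ((cs.take k).count 'W' : Int))) i 0
          + PySem.List.pyGetD (((List.range (cs.length + 1)).map (fun k => ((cs.reverse.take k).count 'E' : Int))).reverse) (i + 1) 0))
      (3 * 10 ^ 5 + 1)
    = ((List.range n).map (pvCand cs)).foldl min (3 * 10 ^ 5 + 1) := by
  induction n with
  | zero => simp [PySem.List.pyRange_one_eq_nil]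
  | succ n ih =>
    have hlt : n < cs.length := hn
    have hcast : ((n + 1 : Nat) : Int) = (n : Int) + 1 := by push_cast; ring
    rw [hcast, PySem.List.pyRange_one_succ_right (by positivity), List.foldl_append,
        ih (Nat.le_of_succ_le hn), List.foldl_cons, List.foldl_nil]
    conv_rhs => rw [List.range_succ, List.map_append, List.foldl_append, List.map_cons,
      List.map_nil, List.foldl_cons, List.foldl_nil]
    congr 1
    unfold pvCand
    have hW : PySem.List.pyGetD ((List.range (cs.length + 1)).map (fun k => ((cs.take k).count 'W' : Int))) ((n : Int)) 0
        = ((cs.take n).count 'W' : Int) := by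
      rw [PySem.List.pyGetD_natCast, List.getD_eq_getElem _ _ (by simpa using Nat.lt_succ_of_lt hlt)]
      simp
    have hE : PySem.List.pyGetD ((((List.range (cs.length + 1)).map (fun k => ((cs.reverse.take k).count 'E' : Int))).reverse)) ((n : Int) + 1) 0
        = ((cs.drop (n + 1)).count 'E' : Int) := by
      rw [show ((n : Int) + 1) = ((n + 1 : Nat) : Int) by push_cast; ring,
          PySem.List.pyGetD_natCast,
          List.getD_eq_getElem _ _ (by simpa using by omega)]
      rw [List.getElem_reverse]
      simp only [List.getElem_map, List.getElem_range, List.length_map, List.length_range]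
      rw [List.take_reverse, List.count_reverse,
          show cs.length - (cs.length + 1 - 1 - (n + 1)) = n + 1 by omega]
    rw [hW, hE]

-- ===== VERDICT (by name: the statement is the Claim_ definition above) =====
theorem solve_spec : Claim_equal_solve := by
  intro N S _ hpre
  unfold Spec_solve
  simp only [solve, solve_alt]
  by_cases hN : 0 ≤ N
  · obtain ⟨n, rfl⟩ : ∃ n : Nat, N = (n : Int) := ⟨N.toNat, (Int.toNat_of_nonneg hN).symm⟩
    have hn : n ≤ S.toList.length := by
      unfold Pre_solve at hpre
      rw [PySem.Str.len_eq] at hpre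
      exact_mod_cast hpre
    rw [pv_build_spec 'W' S.toList, pv_build_spec 'E' S.toList.reverse,
        PySem.Dict.getD_counter, List.length_reverse,
        pv_foldA_spec S.toList n hn, pv_foldB_spec S.toList n hn]
  · rw [PySem.List.pyRange_one_eq_nil (by omega), List.foldl_nil, List.foldl_nil]
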